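-- pv_equiv track=rewrite | github.com/axellbrendow/leetcode | sort-transformed-array.py | get_arr_pattern
-- ===== SOURCE A (Python) =====
-- ASCENDING = -2
--
-- DESCENDING = -3
--
-- NOT_SURE = -4
--
-- def get_pattern(val1, val2):
-- 	return NOT_SURE if val1 == val2 else ASCENDING if val1 < val2 else DESCENDING
--
-- def get_arr_pattern(arr):
-- 	pattern = get_pattern(arr[0], arr[1])
-- 	for i in range(2, len(arr)):
-- 		new_pattern = get_pattern(arr[i - 1], arr[i])
-- 		if pattern == NOT_SURE:
-- 			pattern = new_pattern
-- 		elif new_pattern != NOT_SURE and new_pattern != pattern: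
-- 			return new_pattern, i
-- 	return pattern, -1
-- ===== SOURCE B (Python) =====
-- ASCENDING = -2
--
-- DESCENDING = -3
--
-- NOT_SURE = -4
--
-- def get_pattern(val1, val2):
--     return NOT_SURE if val1 == val2 else ASCENDING if val1 < val2 else DESCENDING
--
-- def get_arr_pattern(arr):
--     # materialize the list of concrete (non-equal) adjacent-pair directions with their indices
--     concrete = [(i, get_pattern(arr[i - 1], arr[i]))
--                 for i in range(1, len(arr)) if arr[i - 1] != arr[i]]
--     if not concrete:
--         return NOT_SURE, -1
--     base = concrete[0][1]
--     for i, p in concrete[1:]: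
--         if p != base:
--             return p, i
--     return base, -1
-- ===== Notes on version B (the rewrite author's own statement) =====
-- stated objective: alternative
-- what changed: Replaces A's single stateful scan with a mutable pattern variable by first materializing (via a filtered comprehension) the list of all concrete adjacent-pair directions with indices, then reading the answer off that list: its head fixes the base direction and the first later entry differing from it is the break.
import Mathlib
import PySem

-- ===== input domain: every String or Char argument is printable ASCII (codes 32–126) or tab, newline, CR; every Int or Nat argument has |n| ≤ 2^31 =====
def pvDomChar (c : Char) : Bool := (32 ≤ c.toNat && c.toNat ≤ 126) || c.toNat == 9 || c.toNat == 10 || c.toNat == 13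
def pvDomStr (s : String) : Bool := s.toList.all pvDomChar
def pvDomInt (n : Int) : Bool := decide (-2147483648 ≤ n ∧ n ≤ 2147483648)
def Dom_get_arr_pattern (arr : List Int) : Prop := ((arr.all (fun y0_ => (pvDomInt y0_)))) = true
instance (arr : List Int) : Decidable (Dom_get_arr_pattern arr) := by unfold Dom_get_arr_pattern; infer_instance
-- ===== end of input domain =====

-- B replaces A's single stateful scan by a filtered comprehension materializing the concrete
-- adjacent-pair directions, then reads the answer off that list; objective: alternative, same O(n).

-- ===== PORT A =====
-- get_pattern(val1, val2)
def get_pattern (val1 val2 : Int) : Int :=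
  if val1 = val2 then -4 else if val1 < val2 then -2 else -3

-- the for-loop of A over range(2, len(arr)); indices are always in range under Pre_, so getD is exact
def loopA (arr : List Int) (pattern : Int) : List Nat → Int × Int
  | [] => (pattern, -1)
  | i :: rest =>
    if pattern = -4 then loopA arr (get_pattern (arr.getD (i - 1) 0) (arr.getD i 0)) rest
    else if get_pattern (arr.getD (i - 1) 0) (arr.getD i 0) ≠ -4 ∧
            get_pattern (arr.getD (i - 1) 0) (arr.getD i 0) ≠ pattern then
      (get_pattern (arr.getD (i - 1) 0) (arr.getD i 0), (i : Int))
    else loopA arr pattern rest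

def get_arr_pattern (arr : List Int) : Int × Int :=
  loopA arr (get_pattern (arr.getD 0 0) (arr.getD 1 0)) (List.range' 2 (arr.length - 2))

-- ===== PORT B =====
-- the for-loop of B over concrete[1:]
def scanB (base : Int) : List (Nat × Int) → Int × Int
  | [] => (base, -1)
  | (i, p) :: rest => if p ≠ base then (p, (i : Int)) else scanB base rest

-- the comprehension: [(i, get_pattern(arr[i-1], arr[i])) for i in range(1, len(arr)) if arr[i-1] != arr[i]]
def concreteB (arr : List Int) (idxs : List Nat) : List (Nat × Int) :=
  (idxs.filter (fun i => arr.getD (i - 1) 0 ≠ arr.getD i 0)).map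
    (fun i => (i, get_pattern (arr.getD (i - 1) 0) (arr.getD i 0)))

def get_arr_pattern_alt (arr : List Int) : Int × Int :=
  match concreteB arr (List.range' 1 (arr.length - 1)) with
  | [] => (-4, -1)
  | (_, base) :: rest => scanB base rest

-- ===== PRECONDITION & SPEC =====
-- A raises IndexError (arr[0]/arr[1]) on arrays of length < 2; exactly those inputs are excluded.
def Pre_get_arr_pattern (arr : List Int) : Prop := 2 ≤ arr.length
instance (arr : List Int) : Decidable (Pre_get_arr_pattern arr) := by unfold Pre_get_arr_pattern; infer_instance
def pvWitness_get_arr_pattern : List Int := [1, 2, 2]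

def Spec_get_arr_pattern (arr : List Int) (out : Int × Int) : Prop := out = get_arr_pattern_alt arr
instance (arr : List Int) (out : Int × Int) : Decidable (Spec_get_arr_pattern arr out) := by unfold Spec_get_arr_pattern; infer_instance

-- ===== CLAIM (what is proved, stated in full; the proofs are below) =====
def Claim_equal_get_arr_pattern : Prop := ∀ (arr : List Int), Dom_get_arr_pattern arr → Pre_get_arr_pattern arr → Spec_get_arr_pattern arr (get_arr_pattern arr)

-- ===== LEMMAS AND PROOFS =====

-- once A's pattern is concrete (≠ NOT_SURE), its remaining loop is B's scan over the concrete list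
theorem loopA_concrete (arr : List Int) (pattern : Int) (h : pattern ≠ -4) :
    ∀ l : List Nat, loopA arr pattern l = scanB pattern (concreteB arr l)
  | [] => rfl
  | i :: rest => by
    simp only [loopA, if_neg h]
    by_cases he : arr.getD (i - 1) 0 = arr.getD i 0
    · have hnp : get_pattern (arr.getD (i - 1) 0) (arr.getD i 0) = -4 := by
        rw [get_pattern, if_pos he]
      rw [if_neg (by rw [hnp]; simp), concreteB,
        List.filter_cons_of_neg (by simpa using he) (l := rest)]
      exact loopA_concrete arr pattern h rest
    · have hnp : get_pattern (arr.getD (i - 1) 0) (arr.getD i 0) ≠ -4 := by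
        rw [get_pattern, if_neg he]; split <;> decide
      rw [concreteB, List.filter_cons_of_pos (by simpa using he) (l := rest), List.map_cons, scanB]
      by_cases hd : get_pattern (arr.getD (i - 1) 0) (arr.getD i 0) = pattern
      · rw [if_neg (by simp; intro _; simpa using hd), if_neg (by simpa using hd)]
        exact loopA_concrete arr pattern h rest
      · rw [if_pos ⟨hnp, hd⟩, if_pos hd]

-- while A's pattern is still NOT_SURE, its loop computes B's match on the concrete list
theorem loopA_notsure (arr : List Int) :
    ∀ l : List Nat, loopA arr (-4) l =
      (match concreteB arr l with
       | [] => ((-4 : Int), (-1 : Int))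
       | (_, base) :: rest => scanB base rest)
  | [] => rfl
  | i :: rest => by
    simp only [loopA]
    by_cases he : arr.getD (i - 1) 0 = arr.getD i 0
    · have hnp : get_pattern (arr.getD (i - 1) 0) (arr.getD i 0) = -4 := by
        rw [get_pattern, if_pos he]
      rw [hnp, concreteB, List.filter_cons_of_neg (by simpa using he) (l := rest)]
      exact loopA_notsure arr rest
    · have hnp : get_pattern (arr.getD (i - 1) 0) (arr.getD i 0) ≠ -4 := by
        rw [get_pattern, if_neg he]; split <;> decide
      rw [concreteB, List.filter_cons_of_pos (by simpa using he) (l := rest), List.map_cons]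
      exact loopA_concrete arr _ hnp rest

-- ===== VERDICT (by name: the statement is the Claim_ definition above) =====
theorem get_arr_pattern_spec : Claim_equal_get_arr_pattern := by
  intro arr _ hpre
  unfold Pre_get_arr_pattern at hpre
  have hr : List.range' 1 (arr.length - 1) = 1 :: List.range' 2 (arr.length - 2) := by
    have : arr.length - 1 = (arr.length - 2) + 1 := by omega
    rw [this, List.range'_succ]
  simp only [Spec_get_arr_pattern, get_arr_pattern, get_arr_pattern_alt, hr]
  by_cases he : arr.getD 0 0 = arr.getD 1 0
  · have hp1 : get_pattern (arr.getD 0 0) (arr.getD 1 0) = -4 := by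
      rw [get_pattern, if_pos he]
    rw [hp1, concreteB, List.filter_cons_of_neg (by simpa using he)]
    exact loopA_notsure arr (List.range' 2 (arr.length - 2))
  · have hp1 : get_pattern (arr.getD 0 0) (arr.getD 1 0) ≠ -4 := by
      rw [get_pattern, if_neg he]; split <;> decide
    rw [concreteB, List.filter_cons_of_pos (by simpa using he), List.map_cons]
    exact loopA_concrete arr _ hp1 (List.range' 2 (arr.length - 2))
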